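-- pv_equiv track=rewrite | github.com/simungiltia-gif/algoritma-pemrograman-1C-2025 | modul-6/250441100099_ArtiaNurisSahadatin_Modul6_kakFika/no2.py | gabung_tuple
-- ===== SOURCE A (Python) =====
-- def gabung_tuple(t1, t2):
--     # Gabungkan kedua tuple jadi satu list
--     gabungan = list(t1 + t2)
--
--     # Hapus angka yang sama (duplikat), urutan pertama dipertahankan
--     unik = []
--     for angka in gabungan:
--         if angka not in unik:
--             unik.append(angka)
--
--     # Urutkan manual secara menurun (descending)
--     for i in range(len(unik)):
--         for j in range(i + 1, len(unik)):
--             if unik[i] < unik[j]:  # tukar posisi jika elemen kiri lebih kecil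
--                 unik[i], unik[j] = unik[j], unik[i]
--
--     # Kembalikan hasil dalam bentuk tuple
--     return tuple(unik)
-- ===== SOURCE B (Python) =====
-- def gabung_tuple(t1, t2):
--     # Sort the merged sequence once (descending), then drop adjacent duplicates.
--     s = sorted(t1 + t2, reverse=True)
--     hasil = []
--     for x in s:
--         if not hasil or hasil[-1] != x:
--             hasil.append(x)
--     return tuple(hasil)
-- ===== Notes on version B (the rewrite author's own statement) =====
-- stated objective: faster
-- what changed: A dedups by quadratic membership scans and then sorts with nested swap loops; B sorts the merged sequence once (library sort, descending) and removes duplicates in a single adjacency pass.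
import Mathlib
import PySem

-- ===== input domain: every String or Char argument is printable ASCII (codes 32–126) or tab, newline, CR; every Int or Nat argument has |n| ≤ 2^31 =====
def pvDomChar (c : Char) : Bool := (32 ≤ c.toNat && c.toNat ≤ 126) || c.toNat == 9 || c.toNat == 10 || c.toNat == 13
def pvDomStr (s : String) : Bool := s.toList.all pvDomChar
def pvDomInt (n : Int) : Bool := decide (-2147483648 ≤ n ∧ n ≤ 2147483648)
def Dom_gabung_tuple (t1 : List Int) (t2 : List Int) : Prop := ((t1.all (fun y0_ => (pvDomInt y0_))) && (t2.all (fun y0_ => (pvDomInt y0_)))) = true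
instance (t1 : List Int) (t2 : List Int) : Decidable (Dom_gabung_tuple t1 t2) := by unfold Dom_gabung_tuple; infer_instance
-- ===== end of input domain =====

-- B changes the decomposition: A dedups by membership scans then sorts by hand with nested
-- swap loops; B sorts the merged list once and drops adjacent duplicates in one pass.

-- ===== PORT A =====
-- Inner j-loop of A's manual descending sort for one fixed position i: `h` is the value
-- currently held at position i; each j with unik[i] < unik[j] swaps, exactly as in A.
-- Returns (final value at position i, the values left at positions i+1..) in order.
def selPass (h : Int) : List Int → Int × List Int
  | [] => (h, [])
  | x :: xs =>
    if h < x then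
      let p := selPass x xs
      (p.1, h :: p.2)
    else
      let p := selPass h xs
      (p.1, x :: p.2)

theorem selPass_len (h : Int) (xs : List Int) : (selPass h xs).2.length = xs.length := by
  induction xs generalizing h with
  | nil => rfl
  | cons x xs ih =>
    simp only [selPass]
    split <;> simp [ih]

-- Outer i-loop of A's manual sort: after pass i the prefix of length i+1 is never touched
-- again (all later accesses use indices > i), so the loop is recursion on the suffix.
def selSort : List Int → List Int
  | [] => []
  | h :: t =>
    let p := selPass h t
    p.1 :: selSort p.2
termination_by l => l.length
decreasing_by simp [selPass_len]

def gabung_tuple (t1 : List Int) (t2 : List Int) : List Int :=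
  let gabungan := t1 ++ t2
  -- dedup keeping first occurrences, by membership test, as in A
  let unik := gabungan.foldl (fun u angka => if angka ∈ u then u else u ++ [angka]) []
  selSort unik

-- ===== PORT B =====
def gabung_tuple_alt (t1 : List Int) (t2 : List Int) : List Int :=
  let s := PySem.List.sorted (t1 ++ t2) (fun x => x) true
  -- `not hasil or hasil[-1] != x`: getLast? is none on [] and some last otherwise — exact
  s.foldl (fun hasil x => if hasil.getLast? ≠ some x then hasil ++ [x] else hasil) []

-- ===== PRECONDITION & SPEC =====
def Spec_gabung_tuple (t1 : List Int) (t2 : List Int) (out : List Int) : Prop := out = gabung_tuple_alt t1 t2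
instance (t1 : List Int) (t2 : List Int) (out : List Int) : Decidable (Spec_gabung_tuple t1 t2 out) := by unfold Spec_gabung_tuple; infer_instance

-- ===== CLAIM (what is proved, stated in full; the proofs are below) =====
def Claim_equal_gabung_tuple : Prop := ∀ (t1 : List Int) (t2 : List Int), Dom_gabung_tuple t1 t2 → Spec_gabung_tuple t1 t2 (gabung_tuple t1 t2)

-- ===== LEMMAS AND PROOFS =====

-- A's dedup fold: result is nodup, membership is acc ∪ xs
theorem ded_nodup (xs : List Int) : ∀ acc : List Int, acc.Nodup →
    (xs.foldl (fun u a => if a ∈ u then u else u ++ [a]) acc).Nodup := by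
  induction xs with
  | nil => intro acc h; simpa using h
  | cons x xs ih =>
    intro acc h
    simp only [List.foldl_cons]
    split
    · exact ih acc h
    · refine ih _ ?_
      simp only [List.nodup_append, List.nodup_cons, List.nodup_nil, List.not_mem_nil,
        not_false_iff, and_true, true_and]
      exact ⟨h, by simpa using fun a ha h' => ‹_ ∉ _› (h' ▸ ha)⟩

theorem ded_mem (xs : List Int) : ∀ (acc : List Int) (y : Int),
    (y ∈ xs.foldl (fun u a => if a ∈ u then u else u ++ [a]) acc ↔ y ∈ acc ∨ y ∈ xs) := by
  induction xs with
  | nil => simp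
  | cons x xs ih =>
    intro acc y
    simp only [List.foldl_cons]
    split
    · rw [ih]
      constructor
      · rintro (h | h) <;> simp [h]
      · rintro (h | h)
        · exact Or.inl h
        · rcases List.mem_cons.mp h with h | h
          · exact Or.inl (h ▸ ‹x ∈ acc›)
          · exact Or.inr h
    · rw [ih]
      simp only [List.mem_append, List.mem_cons]
      tauto

theorem selPass_perm (xs : List Int) : ∀ h : Int,
    ((selPass h xs).1 :: (selPass h xs).2).Perm (h :: xs) := by
  induction xs with
  | nil => intro h; rfl
  | cons x xs ih =>
    intro h
    simp only [selPass]
    split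
    · show ((selPass x xs).1 :: h :: (selPass x xs).2).Perm (h :: x :: xs)
      exact (List.Perm.swap h _ _).trans ((ih x).cons h)
    · show ((selPass h xs).1 :: x :: (selPass h xs).2).Perm (h :: x :: xs)
      exact ((List.Perm.swap x _ _).trans ((ih h).cons x)).trans (List.Perm.swap h x xs)

theorem selPass_max (xs : List Int) : ∀ (h y : Int), y ∈ h :: xs → y ≤ (selPass h xs).1 := by
  induction xs with
  | nil => intro h y hy; simp at hy; simp [selPass, hy]
  | cons x xs ih =>
    intro h y hy
    simp only [selPass]
    rcases List.mem_cons.mp hy with rfl | hmem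
    · -- y is the held value h
      split
      · exact le_trans (le_of_lt ‹_›) (ih x x (by simp))
      · exact ih y y (by simp)
    · -- y ∈ x :: xs
      split
      · exact ih x y hmem
      · rcases List.mem_cons.mp hmem with rfl | hmem'
        · exact le_trans (not_lt.mp ‹_›) (ih h h (by simp))
        · exact ih h y (by simp [hmem'])

theorem selSort_spec : ∀ (n : Nat) (l : List Int), l.length ≤ n →
    (selSort l).Perm l ∧ (selSort l).Pairwise (fun a b => b ≤ a) := by
  intro n
  induction n with
  | zero =>
    intro l hl
    have : l = [] := List.eq_nil_of_length_eq_zero (Nat.le_zero.mp hl)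
    subst this; simp [selSort]
  | succ n ih =>
    intro l hl
    match l with
    | [] => simp [selSort]
    | h :: t =>
      rw [selSort]
      have hlen : (selPass h t).2.length ≤ n := by
        rw [selPass_len]; simpa using hl
      obtain ⟨ihp, ihs⟩ := ih _ hlen
      have hperm : ((selPass h t).1 :: selSort (selPass h t).2).Perm (h :: t) :=
        ((ihp.cons _).trans (selPass_perm t h))
      refine ⟨hperm, ?_⟩
      rw [List.pairwise_cons]
      refine ⟨?_, ihs⟩
      intro b hb
      have hb' : b ∈ (selPass h t).2 := ihp.mem_iff.mp hb
      have : b ∈ h :: t := (selPass_perm t h).mem_iff.mp (List.mem_cons_of_mem _ hb')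
      exact selPass_max t h b this

-- B's adjacency fold: strictly descending, membership is acc ∪ s
theorem last_le_of_pairwise_gt : ∀ (acc : List Int), acc.Pairwise (fun a b => a > b) →
    ∀ la, acc.getLast? = some la → ∀ a ∈ acc, la ≤ a := by
  intro acc
  induction acc with
  | nil => intro _ la h; simp at h
  | cons x t ih =>
    intro hp la hla a ha
    rcases List.pairwise_cons.mp hp with ⟨hx, ht⟩
    match t with
    | [] =>
      simp at hla ha; omega
    | y :: t' =>
      rw [List.getLast?_cons_cons] at hla
      have hlat := ih ht la hla
      have hlay : la ≤ y := hlat y (by simp)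
      rcases List.mem_cons.mp ha with rfl | ha'
      · have := hx y (by simp); omega
      · exact hlat a ha'

theorem adj_spec (s : List Int) : ∀ acc : List Int,
    s.Pairwise (fun a b => b ≤ a) →
    acc.Pairwise (fun a b => a > b) →
    (∀ la, acc.getLast? = some la → ∀ b ∈ s, b ≤ la) →
    (s.foldl (fun hasil x => if hasil.getLast? ≠ some x then hasil ++ [x] else hasil) acc).Pairwise (fun a b => a > b) ∧
    (∀ y, y ∈ s.foldl (fun hasil x => if hasil.getLast? ≠ some x then hasil ++ [x] else hasil) acc ↔ y ∈ acc ∨ y ∈ s) := by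
  induction s with
  | nil => intro acc _ hp _; exact ⟨hp, by simp⟩
  | cons x s ih =>
    intro acc hs hp hinv
    have hxs : ∀ b ∈ s, b ≤ x := (List.pairwise_cons.mp hs).1
    have hs' : s.Pairwise (fun a b => b ≤ a) := (List.pairwise_cons.mp hs).2
    simp only [List.foldl_cons]
    split
    · -- append x
      rename_i hne
      have hp' : (acc ++ [x]).Pairwise (fun a b => a > b) := by
        rw [List.pairwise_append]
        refine ⟨hp, by simp, ?_⟩
        intro a ha b hb
        simp only [List.mem_singleton] at hb; subst hb
        match hacc : acc.getLast? with
        | none => simp [List.getLast?_eq_none_iff.mp hacc] at ha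
        | some la =>
          have hxla : b ≤ la := hinv la hacc b (List.mem_cons_self ..)
          have hlt : b < la := lt_of_le_of_ne hxla (fun h => hne (by rw [hacc, h]))
          have := last_le_of_pairwise_gt acc hp la hacc a ha
          omega
      have hinv' : ∀ la, (acc ++ [x]).getLast? = some la → ∀ b ∈ s, b ≤ la := by
        intro la hla b hb
        simp [List.getLast?_append] at hla
        exact hla ▸ hxs b hb
      obtain ⟨h1, h2⟩ := ih (acc ++ [x]) hs' hp' hinv'
      refine ⟨h1, fun y => ?_⟩
      rw [h2]; simp only [List.mem_append, List.mem_cons]; tauto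
    · -- skip x: last of acc is x, so x ∈ acc already
      rename_i hne
      have hacc : acc.getLast? = some x := not_ne_iff.mp hne
      have hxmem : x ∈ acc := List.mem_of_getLast? hacc
      have hinv' : ∀ la, acc.getLast? = some la → ∀ b ∈ s, b ≤ la := by
        intro la hla b hb
        rw [hacc] at hla
        exact (Option.some_injective _ hla) ▸ hxs b hb
      obtain ⟨h1, h2⟩ := ih acc hs' hp hinv'
      refine ⟨h1, fun y => ?_⟩
      rw [h2]; simp only [List.mem_cons]
      constructor
      · rintro (h | h)
        · exact Or.inl h
        · exact Or.inr (Or.inr h)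
      · rintro (h | rfl | h)
        · exact Or.inl h
        · exact Or.inl hxmem
        · exact Or.inr h

theorem gabung_tuple_eq (t1 t2 : List Int) : gabung_tuple t1 t2 = gabung_tuple_alt t1 t2 := by
  unfold gabung_tuple gabung_tuple_alt
  set m := t1 ++ t2 with hm
  set d := m.foldl (fun u a => if a ∈ u then u else u ++ [a]) [] with hd
  set s := PySem.List.sorted m (fun x => x) true with hs
  -- A's side
  obtain ⟨hAperm, hAge⟩ := selSort_spec d.length d (le_refl _)
  have hdnd : d.Nodup := ded_nodup m [] (by simp)
  have hAnd : (selSort d).Nodup := hAperm.nodup_iff.mpr hdnd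
  have hAgt : (selSort d).Pairwise (fun a b => a > b) := by
    have := hAge.and hAnd
    exact this.imp (fun h => lt_of_le_of_ne h.1 (Ne.symm h.2))
  have hAmem : ∀ y, y ∈ selSort d ↔ y ∈ m := by
    intro y
    rw [hAperm.mem_iff, hd, ded_mem]
    simp
  -- B's side
  have hsdesc : s.Pairwise (fun a b => b ≤ a) := PySem.List.sorted_pairwise_rev m (fun x => x)
  obtain ⟨hBgt, hBmem⟩ := adj_spec s [] hsdesc (by simp) (by simp)
  have hBmem' : ∀ y, y ∈ s.foldl (fun hasil x => if hasil.getLast? ≠ some x then hasil ++ [x] else hasil) [] ↔ y ∈ m := by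
    intro y
    rw [hBmem]
    simp [hs, PySem.List.mem_sorted]
  -- equality of two strictly descending lists with the same members
  have hBnd : (s.foldl (fun hasil x => if hasil.getLast? ≠ some x then hasil ++ [x] else hasil) []).Nodup :=
    hBgt.imp (fun h => by omega)
  have hperm : (selSort d).Perm (s.foldl (fun hasil x => if hasil.getLast? ≠ some x then hasil ++ [x] else hasil) []) := by
    rw [List.perm_ext_iff_of_nodup hAnd hBnd]
    intro y
    rw [hAmem, hBmem']
  exact hperm.eq_of_pairwise (fun a b _ _ h1 h2 => by omega) hAgt hBgt

-- ===== VERDICT (by name: the statement is the Claim_ definition above) =====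
theorem gabung_tuple_spec : Claim_equal_gabung_tuple := by
  intro t1 t2 _
  exact gabung_tuple_eq t1 t2
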